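-- pv_equiv track=rewrite | github.com/yeseongcho/- | ICT 문제해결기법/PA3/PA3two.py | make_quarter
-- ===== SOURCE A (Python) =====
-- def quick_sort(lists) :
--     if len(lists) <= 1 :
--         return lists
--     pivot = lists[len(lists)//2]
--     less_arr, equal_arr, big_arr = [], [], []
--     for i in lists :
--         if i < pivot :
--             less_arr.append(i)
--         elif i > pivot :
--             big_arr.append(i)
--         else :
--             equal_arr.append(i)
--     return quick_sort(less_arr) + equal_arr + quick_sort(big_arr)
--
-- def make_quarter(short_f_x, short_g_x, p, q):
--     quarter = [p]
--     for i in short_f_x :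
--         if i not in quarter :
--             if i <= q :
--                 quarter.append(i)
--
--     for j in short_g_x :
--         if j not in quarter :
--             if j <= q :
--                 quarter.append(j)
--
--
--     quarter = quick_sort(quarter)
--     if q != quarter[len(quarter)-1] :
--         if q not in quarter :
--             quarter.append(q)
--
--     return quarter
-- ===== SOURCE B (Python) =====
-- def make_quarter(short_f_x, short_g_x, p, q):
--     cand = sorted([p] + [x for x in short_f_x if x <= q]
--                       + [x for x in short_g_x if x <= q])
--     out = []
--     for x in cand:
--         if not out or out[-1] != x:
--             out.append(x)
--     if q not in out:
--         out.append(q)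
--     return out
-- ===== Notes on version B (the rewrite author's own statement) =====
-- stated objective: faster
-- what changed: A deduplicates first with a quadratic first-seen membership scan over a growing list and then sorts with a hand-written quicksort; B keeps duplicates, filters and sorts the candidate list once, and removes duplicates in a single adjacent-equality pass over the sorted list.
import Mathlib
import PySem

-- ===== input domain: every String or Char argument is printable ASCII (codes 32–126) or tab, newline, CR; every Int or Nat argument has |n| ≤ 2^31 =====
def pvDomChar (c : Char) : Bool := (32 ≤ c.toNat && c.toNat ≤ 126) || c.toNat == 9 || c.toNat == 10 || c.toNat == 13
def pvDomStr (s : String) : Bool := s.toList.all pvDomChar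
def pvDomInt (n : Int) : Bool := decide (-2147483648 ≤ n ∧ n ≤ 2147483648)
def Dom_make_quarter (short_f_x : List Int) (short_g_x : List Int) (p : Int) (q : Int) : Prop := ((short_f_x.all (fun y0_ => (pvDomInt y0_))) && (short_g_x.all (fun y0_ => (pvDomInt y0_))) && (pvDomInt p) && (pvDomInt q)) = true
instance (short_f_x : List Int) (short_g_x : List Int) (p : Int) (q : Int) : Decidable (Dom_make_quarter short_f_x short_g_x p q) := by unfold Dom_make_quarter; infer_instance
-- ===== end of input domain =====

-- B replaces A's quadratic first-seen dedup + hand-written quicksort by: filter once, sort once,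
-- then a single adjacent-dedup pass over the sorted candidates (objective: faster, measured).

-- ===== PORT A =====
-- the partition loop of quick_sort: one pass appending each element to less/equal/big
def pvQsPart (pivot : Int) (l : List Int) : List Int × List Int × List Int :=
  l.foldl (fun acc i =>
    if i < pivot then (acc.1 ++ [i], acc.2.1, acc.2.2)
    else if pivot < i then (acc.1, acc.2.1, acc.2.2 ++ [i])
    else (acc.1, acc.2.1 ++ [i], acc.2.2)) ([], [], [])

-- stated above the port because quick_sort's termination proof cites it by name
theorem pvQsPart_eq (pivot : Int) (l : List Int) :
    pvQsPart pivot l = (l.filter (· < pivot),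
      l.filter (fun i => ¬ i < pivot ∧ ¬ pivot < i), l.filter (pivot < ·)) := by
  have h : ∀ (l : List Int) (a b c : List Int),
      l.foldl (fun acc i =>
        if i < pivot then (acc.1 ++ [i], acc.2.1, acc.2.2)
        else if pivot < i then (acc.1, acc.2.1, acc.2.2 ++ [i])
        else (acc.1, acc.2.1 ++ [i], acc.2.2)) (a, b, c)
      = (a ++ l.filter (· < pivot),
         b ++ l.filter (fun i => ¬ i < pivot ∧ ¬ pivot < i), c ++ l.filter (pivot < ·)) := by
    intro l
    induction l with
    | nil => intro a b c; simp
    | cons x t ih =>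
      intro a b c
      by_cases h1 : x < pivot
      · rw [List.foldl_cons, if_pos h1, ih]
        have hne : ¬ (¬ x < pivot ∧ ¬ pivot < x) := fun hh => hh.1 h1
        simp [List.filter_cons, h1, hne, not_lt.mpr h1.le]
      · by_cases h2 : pivot < x
        · rw [List.foldl_cons, if_neg h1, if_pos h2, ih]
          simp [List.filter_cons, h1, h2]
        · rw [List.foldl_cons, if_neg h1, if_neg h2, ih]
          simp [List.filter_cons, h1, h2]
  simpa using h l [] [] []

theorem pvFilter_length_lt {p : Int → Prop} [DecidablePred p] {pv : Int} (l : List Int)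
    (hmem : pv ∈ l) (hp : ¬ p pv) : (l.filter (fun i => decide (p i))).length < l.length := by
  rcases List.mem_iff_append.mp hmem with ⟨s, t, rfl⟩
  simp [List.filter_append, hp]
  calc (List.filter (fun i => decide (p i)) s).length + (List.filter (fun i => decide (p i)) t).length
      ≤ s.length + t.length := by
        exact Nat.add_le_add (List.length_filter_le _ _) (List.length_filter_le _ _)
    _ < s.length + (t.length + 1) := by omega

theorem pvPivot_mem (l : List Int) (h : ¬ l.length ≤ 1) : l.getD (l.length / 2) 0 ∈ l := by
  have hlt : l.length / 2 < l.length := Nat.div_lt_self (by omega) (by omega)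
  rw [List.getD_eq_getElem l 0 hlt]
  exact List.getElem_mem hlt

def quick_sort (l : List Int) : List Int :=
  if h : l.length ≤ 1 then l
  else
    -- l[len(l)//2]: the index is in range since the list is nonempty, so getD is exact
    let pivot := l.getD (l.length / 2) 0
    let t := pvQsPart pivot l
    quick_sort t.1 ++ t.2.1 ++ quick_sort t.2.2
termination_by l.length
decreasing_by
  · have := pvFilter_length_lt (p := fun i => i < l.getD (l.length / 2) 0) l
      (pvPivot_mem l h) (lt_irrefl _)
    simpa [pvQsPart_eq] using this
  · have := pvFilter_length_lt (p := fun i => l.getD (l.length / 2) 0 < i) l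
      (pvPivot_mem l h) (lt_irrefl _)
    simpa [pvQsPart_eq] using this

-- the body of both membership-dedup loops of A
def pvUniqStep (q : Int) (acc : List Int) (i : Int) : List Int :=
  if i ∈ acc then acc else if i ≤ q then acc ++ [i] else acc

def make_quarter (short_f_x : List Int) (short_g_x : List Int) (p : Int) (q : Int) : List Int :=
  let quarter0 := short_g_x.foldl (pvUniqStep q) (short_f_x.foldl (pvUniqStep q) [p])
  let quarter := quick_sort quarter0
  -- quarter[len(quarter)-1]: quarter is nonempty (it contains p), so getD is exact
  if q ≠ quarter.getD (quarter.length - 1) 0 then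
    if q ∈ quarter then quarter else quarter ++ [q]
  else quarter

-- ===== PORT B =====
-- the body of Source B's emit loop: append x unless it equals the last emitted value
def pvEmitStep (out : List Int) (x : Int) : List Int :=
  if out = [] ∨ ¬ out.getLast? = some x then out ++ [x] else out

def make_quarter_alt (short_f_x : List Int) (short_g_x : List Int) (p : Int) (q : Int) : List Int :=
  let cand := PySem.List.sorted
    (p :: (short_f_x.filter (· ≤ q) ++ short_g_x.filter (· ≤ q))) id
  let out := cand.foldl pvEmitStep []
  if q ∈ out then out else out ++ [q]

-- ===== PRECONDITION & SPEC =====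
def Spec_make_quarter (short_f_x : List Int) (short_g_x : List Int) (p : Int) (q : Int) (out : List Int) : Prop := out = make_quarter_alt short_f_x short_g_x p q
instance (short_f_x : List Int) (short_g_x : List Int) (p : Int) (q : Int) (out : List Int) : Decidable (Spec_make_quarter short_f_x short_g_x p q out) := by unfold Spec_make_quarter; infer_instance

-- ===== CLAIM (what is proved, stated in full; the proofs are below) =====
def Claim_equal_make_quarter : Prop := ∀ (short_f_x : List Int) (short_g_x : List Int) (p : Int) (q : Int), Dom_make_quarter short_f_x short_g_x p q → Spec_make_quarter short_f_x short_g_x p q (make_quarter short_f_x short_g_x p q)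

-- ===== LEMMAS AND PROOFS =====

theorem quick_sort_perm (l : List Int) : (quick_sort l).Perm l := by
  by_cases h : l.length ≤ 1
  · rw [quick_sort, dif_pos h]
  · rw [quick_sort, dif_neg h]
    simp only [pvQsPart_eq]
    set pv := l.getD (l.length / 2) 0 with hpv
    have ih1 := quick_sort_perm (l.filter (· < pv))
    have ih2 := quick_sort_perm (l.filter (pv < ·))
    have key : ∀ (pred : Int → Bool) (x : Int),
        (l.filter pred).count x = if pred x = true then l.count x else 0 := by
      intro pred x
      by_cases hp : pred x = true
      · rw [if_pos hp, List.count_filter hp]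
      · rw [if_neg hp, List.count_eq_zero]
        intro hm
        exact hp (List.mem_filter.mp hm).2
    have hpart : (l.filter (· < pv) ++ (l.filter (fun i => ¬ i < pv ∧ ¬ pv < i)
        ++ l.filter (pv < ·))).Perm l := by
      rw [List.perm_iff_count]
      intro x
      simp only [List.count_append, key]
      split_ifs with h1 h2 h3 <;> simp_all <;> omega
    rw [List.append_assoc]
    exact List.Perm.trans
      (List.Perm.append ih1 (List.Perm.append (List.Perm.refl _) ih2)) hpart
termination_by l.length
decreasing_by
  · have := pvFilter_length_lt (p := fun i => i < l.getD (l.length / 2) 0) l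
      (pvPivot_mem l h) (lt_irrefl _)
    simpa using this
  · have := pvFilter_length_lt (p := fun i => l.getD (l.length / 2) 0 < i) l
      (pvPivot_mem l h) (lt_irrefl _)
    simpa using this

theorem quick_sort_sorted (l : List Int) : (quick_sort l).Pairwise (· ≤ ·) := by
  by_cases h : l.length ≤ 1
  · rw [quick_sort, dif_pos h]
    match l, h with
    | [], _ => exact List.Pairwise.nil
    | [x], _ => exact List.pairwise_singleton _ _
  · rw [quick_sort, dif_neg h]
    simp only [pvQsPart_eq]
    set pv := l.getD (l.length / 2) 0 with hpv
    have ih1 := quick_sort_sorted (l.filter (· < pv))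
    have ih2 := quick_sort_sorted (l.filter (pv < ·))
    have hm1 : ∀ x ∈ quick_sort (l.filter (· < pv)), x < pv := by
      intro x hx
      have := (quick_sort_perm (l.filter (· < pv))).mem_iff.mp hx
      simpa using (List.mem_filter.mp this).2
    have hm2 : ∀ x ∈ quick_sort (l.filter (pv < ·)), pv < x := by
      intro x hx
      have := (quick_sort_perm (l.filter (pv < ·))).mem_iff.mp hx
      simpa using (List.mem_filter.mp this).2
    have hmeq : ∀ x ∈ l.filter (fun i => ¬ i < pv ∧ ¬ pv < i), x = pv := by
      intro x hx
      have := (List.mem_filter.mp hx).2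
      simp at this
      omega
    rw [List.append_assoc, List.pairwise_append]
    refine ⟨ih1, ?_, ?_⟩
    · rw [List.pairwise_append]
      refine ⟨?_, ih2, ?_⟩
      · exact List.pairwise_of_forall_mem_list
          (fun a ha b hb => by rw [hmeq a ha, hmeq b hb])
      · intro x hx y hy
        rw [hmeq x hx]
        exact (hm2 y hy).le
    · intro x hx y hy
      rcases List.mem_append.mp hy with hy | hy
      · rw [hmeq y hy]; exact (hm1 x hx).le
      · exact ((hm1 x hx).trans (hm2 y hy)).le
termination_by l.length
decreasing_by
  · have := pvFilter_length_lt (p := fun i => i < l.getD (l.length / 2) 0) l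
      (pvPivot_mem l h) (lt_irrefl _)
    simpa using this
  · have := pvFilter_length_lt (p := fun i => l.getD (l.length / 2) 0 < i) l
      (pvPivot_mem l h) (lt_irrefl _)
    simpa using this

theorem pvUniqFold_mem (q : Int) (l : List Int) (acc : List Int) (x : Int) :
    x ∈ l.foldl (pvUniqStep q) acc ↔ x ∈ acc ∨ (x ∈ l ∧ x ≤ q) := by
  induction l generalizing acc with
  | nil => simp
  | cons i t ih =>
    simp only [List.foldl_cons, ih, pvUniqStep]
    split
    · rename_i hi
      constructor
      · rintro (hx | hx)
        · exact Or.inl hx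
        · exact Or.inr ⟨List.mem_cons_of_mem _ hx.1, hx.2⟩
      · rintro (hx | ⟨hx, hxq⟩)
        · exact Or.inl hx
        · rcases List.mem_cons.mp hx with rfl | hx
          · exact Or.inl hi
          · exact Or.inr ⟨hx, hxq⟩
    · rename_i hi
      split
      · rename_i hiq
        constructor
        · rintro (hx | hx)
          · rcases List.mem_append.mp hx with hx | hx
            · exact Or.inl hx
            · simp at hx; subst hx; exact Or.inr ⟨List.mem_cons_self .., hiq⟩
          · exact Or.inr ⟨List.mem_cons_of_mem _ hx.1, hx.2⟩
        · rintro (hx | ⟨hx, hxq⟩)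
          · exact Or.inl (List.mem_append_left _ hx)
          · rcases List.mem_cons.mp hx with rfl | hx
            · exact Or.inl (List.mem_append_right _ (by simp))
            · exact Or.inr ⟨hx, hxq⟩
      · rename_i hiq
        constructor
        · rintro (hx | hx)
          · exact Or.inl hx
          · exact Or.inr ⟨List.mem_cons_of_mem _ hx.1, hx.2⟩
        · rintro (hx | ⟨hx, hxq⟩)
          · exact Or.inl hx
          · rcases List.mem_cons.mp hx with rfl | hx
            · exact absurd hxq hiq
            · exact Or.inr ⟨hx, hxq⟩

theorem pvUniqFold_nodup (q : Int) (l : List Int) (acc : List Int) (h : acc.Nodup) :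
    (l.foldl (pvUniqStep q) acc).Nodup := by
  induction l generalizing acc with
  | nil => simpa
  | cons i t ih =>
    simp only [List.foldl_cons, pvUniqStep]
    split
    · exact ih acc h
    · rename_i hi
      split
      · exact ih _ (by
          simp [List.nodup_append, h]
          exact fun a ha he => hi (he ▸ ha))
      · exact ih acc h

-- structural view of the emit loop: dedup relative to the last emitted value
def pvDedupAux : Option Int → List Int → List Int
  | _, [] => []
  | last, x :: t => if last = some x then pvDedupAux last t else x :: pvDedupAux (some x) t

theorem pvEmitStep_eq (out : List Int) (x : Int) :
    pvEmitStep out x = if out.getLast? = some x then out else out ++ [x] := by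
  unfold pvEmitStep
  by_cases h : out.getLast? = some x
  · have hne : out ≠ [] := by intro hh; rw [hh] at h; simp at h
    rw [if_pos h, if_neg (by simp [hne, h])]
  · rw [if_neg h]
    by_cases he : out = []
    · rw [if_pos (Or.inl he)]
    · rw [if_pos (Or.inr h)]

theorem pvFoldl_emit (l : List Int) (acc : List Int) :
    l.foldl pvEmitStep acc = acc ++ pvDedupAux acc.getLast? l := by
  induction l generalizing acc with
  | nil => simp [pvDedupAux]
  | cons x t ih =>
    rw [List.foldl_cons, pvEmitStep_eq, pvDedupAux]
    by_cases h : acc.getLast? = some x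
    · rw [if_pos h, if_pos h, ih]
    · rw [if_neg h, if_neg h, ih, List.getLast?_concat, List.append_assoc]
      rfl

theorem pvDedupAux_main (l : List Int) (h : l.Pairwise (· ≤ ·)) (a : Int)
    (hb : ∀ y ∈ l, a ≤ y) :
    (pvDedupAux (some a) l).Pairwise (· < ·)
      ∧ (∀ x, x ∈ pvDedupAux (some a) l ↔ x ∈ l ∧ x ≠ a)
      ∧ (∀ x ∈ pvDedupAux (some a) l, a < x) := by
  induction l generalizing a with
  | nil => simp [pvDedupAux]
  | cons x t ih =>
    rw [List.pairwise_cons] at h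
    obtain ⟨hle, ht⟩ := h
    have hax : a ≤ x := hb x (List.mem_cons_self ..)
    rw [pvDedupAux]
    by_cases hx : a = x
    · rw [if_pos (by rw [hx])]
      obtain ⟨ih1, ih2, ih3⟩ := ih ht a (fun y hy => hx ▸ hle y hy)
      refine ⟨ih1, ?_, ih3⟩
      intro z
      rw [ih2]
      constructor
      · exact fun ⟨hz, hzn⟩ => ⟨List.mem_cons_of_mem _ hz, hzn⟩
      · rintro ⟨hz, hzn⟩
        rcases List.mem_cons.mp hz with rfl | hz
        · exact absurd hx.symm hzn
        · exact ⟨hz, hzn⟩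
    · rw [if_neg (by simpa using hx)]
      obtain ⟨ih1, ih2, ih3⟩ := ih ht x hle
      have hlt : a < x := lt_of_le_of_ne hax hx
      refine ⟨?_, ?_, ?_⟩
      · rw [List.pairwise_cons]
        exact ⟨ih3, ih1⟩
      · intro z
        constructor
        · intro hz
          rcases List.mem_cons.mp hz with rfl | hz
          · exact ⟨List.mem_cons_self .., fun he => hx he.symm⟩
          · obtain ⟨hzt, hzx⟩ := (ih2 z).mp hz
            refine ⟨List.mem_cons_of_mem _ hzt, ?_⟩
            rintro rfl
            exact absurd (hle z hzt) (by omega)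
        · rintro ⟨hz, hzn⟩
          rcases List.mem_cons.mp hz with rfl | hz
          · exact List.mem_cons_self ..
          · by_cases hzx : z = x
            · rw [hzx]; exact List.mem_cons_self ..
            · exact List.mem_cons_of_mem _ ((ih2 z).mpr ⟨hz, hzx⟩)
      · intro z hz
        rcases List.mem_cons.mp hz with rfl | hz
        · exact hlt
        · exact hlt.trans (ih3 z hz)

theorem pvDedupNone (l : List Int) (h : l.Pairwise (· ≤ ·)) :
    (pvDedupAux none l).Pairwise (· < ·) ∧ (∀ x, x ∈ pvDedupAux none l ↔ x ∈ l) := by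
  cases l with
  | nil => simp [pvDedupAux]
  | cons x t =>
    rw [List.pairwise_cons] at h
    obtain ⟨hle, ht⟩ := h
    rw [pvDedupAux, if_neg (by simp)]
    obtain ⟨ih1, ih2, ih3⟩ := pvDedupAux_main t ht x hle
    refine ⟨?_, ?_⟩
    · rw [List.pairwise_cons]
      exact ⟨ih3, ih1⟩
    · intro z
      constructor
      · intro hz
        rcases List.mem_cons.mp hz with rfl | hz
        · exact List.mem_cons_self ..
        · exact List.mem_cons_of_mem _ ((ih2 z).mp hz).1
      · intro hz
        rcases List.mem_cons.mp hz with rfl | hz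
        · exact List.mem_cons_self ..
        · by_cases hzx : z = x
          · rw [hzx]; exact List.mem_cons_self ..
          · exact List.mem_cons_of_mem _ ((ih2 z).mpr ⟨hz, hzx⟩)

theorem pvCore_eq (short_f_x short_g_x : List Int) (p q : Int) :
    quick_sort (short_g_x.foldl (pvUniqStep q) (short_f_x.foldl (pvUniqStep q) [p]))
      = pvDedupAux none (PySem.List.sorted
          (p :: (short_f_x.filter (· ≤ q) ++ short_g_x.filter (· ≤ q))) id) := by
  set u := short_g_x.foldl (pvUniqStep q) (short_f_x.foldl (pvUniqStep q) [p]) with hu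
  set c := PySem.List.sorted (p :: (short_f_x.filter (· ≤ q) ++ short_g_x.filter (· ≤ q))) id
    with hc
  have hcs : c.Pairwise (· ≤ ·) := by
    have := PySem.List.sorted_pairwise
      (p :: (short_f_x.filter (· ≤ q) ++ short_g_x.filter (· ≤ q))) id
    simpa using this
  obtain ⟨hlt, hm⟩ := pvDedupNone c hcs
  have hqs := quick_sort_sorted u
  have hnd1 : (quick_sort u).Nodup :=
    (quick_sort_perm u).nodup_iff.mpr (pvUniqFold_nodup q _ _ (pvUniqFold_nodup q _ _ (by simp)))
  have hnd2 : (pvDedupAux none c).Nodup := hlt.nodup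
  have hmem : ∀ x, x ∈ quick_sort u ↔ x ∈ pvDedupAux none c := by
    intro x
    rw [(quick_sort_perm u).mem_iff, hm, hu, hc,
      (PySem.List.sorted_perm _ id false).mem_iff]
    simp [pvUniqFold_mem, List.mem_filter]
    tauto
  exact List.Perm.eq_of_pairwise (fun a b _ _ h1 h2 => le_antisymm h1 h2) hqs
    (hlt.imp fun hab => le_of_lt hab)
    ((List.perm_ext_iff_of_nodup hnd1 hnd2).mpr hmem)

-- ===== VERDICT (by name: the statement is the Claim_ definition above) =====
theorem make_quarter_spec : Claim_equal_make_quarter := by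
  intro f g p q _
  show make_quarter f g p q = make_quarter_alt f g p q
  simp only [make_quarter, make_quarter_alt, pvFoldl_emit, List.nil_append,
    List.getLast?_nil, ← pvCore_eq f g p q]
  set L := quick_sort (g.foldl (pvUniqStep q) (f.foldl (pvUniqStep q) [p])) with hL
  have hpL : p ∈ L := by
    rw [hL, (quick_sort_perm _).mem_iff, pvUniqFold_mem, pvUniqFold_mem]
    simp
  by_cases hq : q ∈ L
  · simp [hq]
  · have hlast : L.getD (L.length - 1) 0 ∈ L := by
      have hne : L ≠ [] := List.ne_nil_of_mem hpL
      have hlt : L.length - 1 < L.length := by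
        have := List.length_pos_of_ne_nil hne; omega
      rw [List.getD_eq_getElem L 0 hlt]
      exact List.getElem_mem hlt
    have hne : q ≠ L.getD (L.length - 1) 0 := fun h => hq (h ▸ hlast)
    have hne' : ¬ q = L[L.length - 1]?.getD 0 := by simpa [List.getD] using hne
    simp [hq, hne']
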